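-- pv_equiv track=rewrite | github.com/FatemehFN/local_network_control | classification_operations.py | common_part
-- ===== SOURCE A (Python) =====
-- def common_part(min_trap_spaces, group):
--     """
--     Identifies the common fixed states (keys and values) across a group of minimal trapping sets.
--
--     Args:
--         min_trap_spaces (list of dict): A list of dictionaries, where each dictionary
--                                          represents a minimal trapping set.
--         group (list): A list of indices indicating which minimal trapping sets from
--                       min_trap_spaces belong to the current cluster.
--
--     Returns:
--         dict: A dictionary representing the common fixed states among the specified mints.
--     """
--     mints_in_the_cluster = [min_trap_spaces[int(index)] for index in group]
--     nodes_in_each_mint = [set(mint.keys()) for mint in mints_in_the_cluster]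
--
--     if not nodes_in_each_mint:
--         return {}
--
--     mutual_keys = set.intersection(*nodes_in_each_mint)
--
--     common_part_dict = {}
--     for key in mutual_keys:
--         reference_value = mints_in_the_cluster[0][key]
--         if all(mint[key] == reference_value for mint in mints_in_the_cluster[1:]):
--             common_part_dict[key] = reference_value
--     return common_part_dict
-- ===== SOURCE B (Python) =====
-- def common_part(min_trap_spaces, group):
--     mints = [min_trap_spaces[int(index)] for index in group]
--     if not mints:
--         return {}
--     common = dict(mints[0])
--     for mint in mints[1:]:
--         common = {k: v for k, v in common.items() if k in mint and mint[k] == v}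
--     return common
-- ===== Notes on version B (the rewrite author's own statement) =====
-- stated objective: simpler
-- what changed: Instead of computing a global key-set intersection and then a separate per-key all() scan, B folds over the selected dicts, narrowing a running dict to the entries the current dict agrees on.
import Mathlib
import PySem

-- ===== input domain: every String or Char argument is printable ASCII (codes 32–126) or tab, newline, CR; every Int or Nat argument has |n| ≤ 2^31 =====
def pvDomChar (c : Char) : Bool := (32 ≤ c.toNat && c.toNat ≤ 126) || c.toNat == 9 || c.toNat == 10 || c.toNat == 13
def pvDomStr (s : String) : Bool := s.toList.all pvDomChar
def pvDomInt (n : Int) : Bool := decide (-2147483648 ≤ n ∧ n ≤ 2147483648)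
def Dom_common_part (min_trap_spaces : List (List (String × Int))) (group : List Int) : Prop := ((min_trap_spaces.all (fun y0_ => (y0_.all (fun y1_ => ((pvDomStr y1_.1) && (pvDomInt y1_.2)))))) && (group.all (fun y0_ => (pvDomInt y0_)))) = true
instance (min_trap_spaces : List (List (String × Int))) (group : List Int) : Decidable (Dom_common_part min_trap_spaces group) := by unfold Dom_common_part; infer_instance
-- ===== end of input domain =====

-- B replaces A's key-set intersection plus separate per-key all() scan by a single fold that
-- narrows a running dict over the selected dicts (objective: simpler).

-- ===== PORT A =====
def common_part (min_trap_spaces : List (List (String × Int))) (group : List Int) : List (String × Int) :=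
  let mints := group.map (fun index => PySem.List.pyGetD min_trap_spaces index [])
  -- 'if not nodes_in_each_mint: return {}' — nodes_in_each_mint is empty iff mints is empty
  match mints with
  | [] => []
  | m0 :: rest =>
    -- mutual_keys = set.intersection(*nodes_in_each_mint), folded in list order
    let mutualKeys :=
      (rest.map (fun mint => PySem.Set.ofList ((PySem.Dict.mk mint).keys))).foldl
        PySem.Set.inter (PySem.Set.ofList ((PySem.Dict.mk m0).keys))
    -- for key in mutual_keys: … (key is present in every mint, so mint[key] = getD key 0)
    (mutualKeys.foldl (fun d key =>
        let referenceValue := (PySem.Dict.mk m0).getD key 0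
        if rest.all (fun mint => (PySem.Dict.mk mint).getD key 0 == referenceValue)
        then d.insert key referenceValue else d)
      PySem.Dict.empty).items

-- ===== PORT B =====
def common_part_alt (min_trap_spaces : List (List (String × Int))) (group : List Int) : List (String × Int) :=
  let mints := group.map (fun index => PySem.List.pyGetD min_trap_spaces index [])
  match mints with
  | [] => []
  | m0 :: rest =>
    -- common = dict(mints[0]) (a copy); then narrow it over the remaining mints
    rest.foldl (fun common mint =>
      common.filter (fun kv =>
        (PySem.Dict.mk mint).contains kv.1 && ((PySem.Dict.mk mint).getD kv.1 0 == kv.2)))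
      m0

-- ===== PRECONDITION & SPEC =====
-- Pre_ excludes group indices out of range (A raises IndexError there) and inner association
-- lists with duplicate keys, which cannot arise from a Python dict argument.
def Pre_common_part (min_trap_spaces : List (List (String × Int))) (group : List Int) : Prop :=
  (∀ index ∈ group, PySem.Raise.InRange min_trap_spaces.length index) ∧
  (∀ m ∈ min_trap_spaces, (m.map Prod.fst).Nodup)
instance (min_trap_spaces : List (List (String × Int))) (group : List Int) : Decidable (Pre_common_part min_trap_spaces group) := by unfold Pre_common_part; infer_instance
def pvWitness_common_part : (List (List (String × Int))) × List Int :=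
  ([[("a", 1), ("b", 2)], [("a", 1), ("c", 3)]], [0, 1])
def Spec_common_part (min_trap_spaces : List (List (String × Int))) (group : List Int) (out : List (String × Int)) : Prop := out = common_part_alt min_trap_spaces group
instance (min_trap_spaces : List (List (String × Int))) (group : List Int) (out : List (String × Int)) : Decidable (Spec_common_part min_trap_spaces group out) := by unfold Spec_common_part; infer_instance

-- ===== CLAIM (what is proved, stated in full; the proofs are below) =====
def Claim_equal_common_part : Prop := ∀ (min_trap_spaces : List (List (String × Int))) (group : List Int), Dom_common_part min_trap_spaces group → Pre_common_part min_trap_spaces group → Spec_common_part min_trap_spaces group (common_part min_trap_spaces group)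

-- ===== LEMMAS AND PROOFS =====

-- fold of binary filtering (Set.inter and B's narrowing loop are both instances)
theorem foldl_filter_all {α β : Type} (g : β → α → Bool) :
    ∀ (ls : List β) (s : List α),
      ls.foldl (fun c t => c.filter (g t)) s = s.filter (fun x => ls.all (fun t => g t x)) := by
  intro ls
  induction ls with
  | nil => intro s; simp
  | cons t ls ih =>
    intro s
    simp only [List.foldl_cons, ih, List.filter_filter]
    exact List.filter_congr (fun x _ => Bool.and_comm _ _)

-- a Dict's membership test agrees with membership in the set of its keys
theorem dict_contains_eq_set_contains (mint : List (String × Int)) (k : String) :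
    (PySem.Dict.mk mint).contains k = (PySem.Set.ofList ((PySem.Dict.mk mint).keys)).contains k := by
  rw [Bool.eq_iff_iff]
  simp only [PySem.Dict.contains, PySem.Set.contains, List.contains_iff_exists_mem_beq,
    PySem.Set.mem_ofList, PySem.Dict.keys, List.mem_map, List.any_eq_true]
  constructor
  · rintro ⟨p, hp, he⟩; exact ⟨p.1, ⟨p, hp, rfl⟩, BEq.symm he⟩
  · rintro ⟨x, ⟨p, hp, rfl⟩, he⟩; exact ⟨p, hp, BEq.symm he⟩

-- items of the dict built by conditionally inserting fresh distinct keys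
theorem items_foldl_insert_if (f : String → Int) (c : String → Bool) :
    ∀ (keys : List String) (d : PySem.Dict String Int), keys.Nodup → (∀ k ∈ keys, d.contains k = false) →
      (keys.foldl (fun d k => if c k then d.insert k (f k) else d) d).items
        = d.items ++ (keys.filter c).map (fun k => (k, f k)) := by
  intro keys
  induction keys with
  | nil => intro d _ _; simp
  | cons k ks ih =>
    intro d hnd hc
    rcases List.nodup_cons.mp hnd with ⟨hk, hks⟩
    by_cases hck : c k = true
    · have hfresh : (∀ k' ∈ ks, (d.insert k (f k)).contains k' = false) := by
        intro k' hk'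
        rw [PySem.Dict.contains_insert]
        have : (k' == k) = false := beq_eq_false_iff_ne.mpr (fun h => hk (h ▸ hk'))
        simp [this, hc k' (List.mem_cons_of_mem _ hk')]
      rw [List.foldl_cons, if_pos hck,
        ih (d.insert k (f k)) hks hfresh,
        PySem.Dict.items_insert_of_not_contains d (f k) (hc k List.mem_cons_self)]
      simp [hck]
    · rw [List.foldl_cons, if_neg hck,
        ih d hks (fun k' hk' => hc k' (List.mem_cons_of_mem _ hk'))]
      simp [hck]

-- keys-then-values filtering equals direct filtering of the association list
theorem filter_keys_map_eq (P : String → Int → Bool) :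
    ∀ (m0 : List (String × Int)), (m0.map Prod.fst).Nodup →
      ((m0.map Prod.fst).filter (fun k => P k ((PySem.Dict.mk m0).getD k 0))).map
          (fun k => (k, (PySem.Dict.mk m0).getD k 0))
        = m0.filter (fun kv => P kv.1 kv.2) := by
  intro m0
  induction m0 with
  | nil => intro _; simp
  | cons kv tl ih =>
    obtain ⟨k, v⟩ := kv
    intro hnd
    rw [List.map_cons] at hnd
    rcases List.nodup_cons.mp hnd with ⟨hk, htl⟩
    have hgk : (PySem.Dict.mk ((k, v) :: tl)).getD k 0 = v := by
      simp [PySem.Dict.getD, PySem.Dict.get?_mk_cons]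
    have hgt : ∀ x ∈ tl.map Prod.fst,
        (PySem.Dict.mk ((k, v) :: tl)).getD x 0 = (PySem.Dict.mk tl).getD x 0 := by
      intro x hx
      have hne : (k == x) = false := beq_eq_false_iff_ne.mpr (fun h => hk (h ▸ hx))
      simp [PySem.Dict.getD, PySem.Dict.get?_mk_cons, hne]
    have htail : ((tl.map Prod.fst).filter
          (fun x => P x ((PySem.Dict.mk ((k, v) :: tl)).getD x 0))).map
          (fun x => (x, (PySem.Dict.mk ((k, v) :: tl)).getD x 0))
        = tl.filter (fun kv => P kv.1 kv.2) := by
      rw [List.filter_congr (fun x hx => by rw [hgt x hx])]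
      rw [List.map_congr_left
        (fun x hx => by rw [hgt x (List.mem_of_mem_filter hx)])]
      exact ih htl
    rw [List.map_cons, List.filter_cons, List.filter_cons, hgk]
    by_cases hP : P k v = true
    · rw [if_pos hP, if_pos hP, List.map_cons, hgk, htail]
    · rw [if_neg hP, if_neg hP, htail]

-- pointwise congruence for Bool 'all'
theorem all_congr_mem {β : Type} (l : List β) (p q : β → Bool) (h : ∀ a ∈ l, p a = q a) :
    l.all p = l.all q := by
  rw [Bool.eq_iff_iff]; simp only [List.all_eq_true]
  exact ⟨fun H a ha => (h a ha) ▸ H a ha, fun H a ha => (h a ha) ▸ H a ha⟩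

-- Bool 'all' distributes over '&&'
theorem all_and_bool {β : Type} (l : List β) (p q : β → Bool) :
    (l.all p && l.all q) = l.all (fun x => p x && q x) := by
  induction l with
  | nil => rfl
  | cons a l ih =>
    simp only [List.all_cons, ← ih]
    cases p a <;> cases q a <;> simp

-- the nonempty-group case: A's intersection-then-scan equals B's narrowing fold
theorem core_cons (m0 : List (String × Int)) (rest : List (List (String × Int)))
    (hm0 : (m0.map Prod.fst).Nodup) :
    (((rest.map (fun mint => PySem.Set.ofList ((PySem.Dict.mk mint).keys))).foldl
          PySem.Set.inter (PySem.Set.ofList ((PySem.Dict.mk m0).keys))).foldl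
        (fun d key =>
          if rest.all (fun mint => (PySem.Dict.mk mint).getD key 0 == (PySem.Dict.mk m0).getD key 0)
          then d.insert key ((PySem.Dict.mk m0).getD key 0) else d)
        PySem.Dict.empty).items
      = rest.foldl (fun common mint => common.filter (fun kv =>
          (PySem.Dict.mk mint).contains kv.1 && ((PySem.Dict.mk mint).getD kv.1 0 == kv.2))) m0 := by
  have h1 : PySem.Set.ofList ((PySem.Dict.mk m0).keys) = m0.map Prod.fst := by
    have hkeys0 : (PySem.Dict.mk m0).keys = m0.map Prod.fst := rfl
    rw [hkeys0]; exact PySem.Set.ofList_eq_self_of_nodup _ hm0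
  have hInter : (rest.map (fun mint => PySem.Set.ofList ((PySem.Dict.mk mint).keys))).foldl
        PySem.Set.inter (PySem.Set.ofList ((PySem.Dict.mk m0).keys))
      = (m0.map Prod.fst).filter
          (fun x => rest.all (fun mint => (PySem.Dict.mk mint).contains x)) := by
    rw [h1]
    refine Eq.trans (foldl_filter_all (fun (t : PySem.Set String) x => PySem.Set.contains t x)
      (rest.map (fun mint => PySem.Set.ofList ((PySem.Dict.mk mint).keys)))
      (m0.map Prod.fst)) ?_
    apply List.filter_congr
    intro x _
    rw [List.all_map]
    exact all_congr_mem rest _ _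
      (fun mint _ => (dict_contains_eq_set_contains mint x).symm)
  refine Eq.trans ?_ (foldl_filter_all
    (fun mint (kv : String × Int) =>
      (PySem.Dict.mk mint).contains kv.1 && ((PySem.Dict.mk mint).getD kv.1 0 == kv.2))
    rest m0).symm
  rw [hInter]
  refine Eq.trans (items_foldl_insert_if (fun k => (PySem.Dict.mk m0).getD k 0)
    (fun k => rest.all (fun mint => (PySem.Dict.mk mint).getD k 0 == (PySem.Dict.mk m0).getD k 0))
    _ PySem.Dict.empty (List.Nodup.filter _ hm0) (fun k _ => rfl)) ?_
  rw [List.filter_filter,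
    show PySem.Dict.empty.items = ([] : List (String × Int)) from rfl, List.nil_append]
  exact Eq.trans (filter_keys_map_eq
      (fun k v => rest.all (fun mint => (PySem.Dict.mk mint).getD k 0 == v)
        && rest.all (fun mint => (PySem.Dict.mk mint).contains k)) m0 hm0)
    (List.filter_congr (fun kv _ =>
      (Bool.and_comm _ _).trans (all_and_bool rest _ _)))

-- ===== VERDICT (by name: the statement is the Claim_ definition above) =====
theorem common_part_spec : Claim_equal_common_part := by
  intro mts group _ hpre
  obtain ⟨hrange, hnodup⟩ := hpre
  have hmem : ∀ m ∈ group.map (fun index => PySem.List.pyGetD mts index []),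
      (m.map Prod.fst).Nodup := by
    intro m hm
    obtain ⟨i, hi, rfl⟩ := List.mem_map.mp hm
    exact hnodup _ (PySem.List.pyGetD_mem mts [] (hrange i hi))
  unfold Spec_common_part common_part common_part_alt
  simp only []
  revert hmem
  generalize group.map (fun index => PySem.List.pyGetD mts index []) = mints
  intro hmem
  cases mints with
  | nil => rfl
  | cons m0 rest =>
    exact core_cons m0 rest (hmem m0 List.mem_cons_self)
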